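-- pv_equiv track=rewrite | github.com/Nikhil-Singla/the-daily-grind | leetcode/python/01_easy/1935_MaxWords.py | canBeTypedWords
-- ===== SOURCE A (Python) =====
-- def canBeTypedWords(text: str, brokenLetters: str) -> int:
--     text = text.split(' ')
--     ans = len(text)
--
--     for word in text:
--         for letter in word:
--             if letter in brokenLetters:
--                 ans -= 1
--                 break
--
--     return ans
-- ===== SOURCE B (Python) =====
-- def canBeTypedWords(text: str, brokenLetters: str) -> int:
--     # Single left-to-right scan over the characters: a tiny state machine that
--     # commits one word at each space, tracking whether the current word has hit
--     # a broken letter.  No split, no per-word inner loop.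
--     broken = set(brokenLetters)
--     good = 0
--     bad = False
--     for ch in text:
--         if ch == ' ':
--             if not bad:
--                 good += 1
--             bad = False
--         elif ch in broken:
--             bad = True
--     return good if bad else good + 1
-- ===== Notes on version B (the rewrite author's own statement) =====
-- stated objective: alternative
-- what changed: Replaces A's split-then-nested-scan with a single left-to-right character scan: a two-field state machine (count of committed typable words, current-word-bad flag) that commits a word at each space, never materialising the word list.
import Mathlib
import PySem

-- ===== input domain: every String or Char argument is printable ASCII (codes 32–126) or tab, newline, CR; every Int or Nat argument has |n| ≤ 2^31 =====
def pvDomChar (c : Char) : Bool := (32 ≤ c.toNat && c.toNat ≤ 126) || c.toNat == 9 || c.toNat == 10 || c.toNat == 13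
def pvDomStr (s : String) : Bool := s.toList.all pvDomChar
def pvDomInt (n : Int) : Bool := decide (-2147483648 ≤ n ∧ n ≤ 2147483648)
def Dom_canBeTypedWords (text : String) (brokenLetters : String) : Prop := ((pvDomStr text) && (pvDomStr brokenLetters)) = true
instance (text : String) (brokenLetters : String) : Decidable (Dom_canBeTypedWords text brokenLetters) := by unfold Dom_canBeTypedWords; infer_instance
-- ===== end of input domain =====

-- B replaces A's split + nested letter loop by one character-by-character state
-- machine (committed-word count, current-word-bad flag); equivalence proved on
-- the whole domain.

-- ===== PORT A =====
-- inner 'for letter in word: if letter in brokenLetters: ans -= 1; break' —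
-- returns whether the break fired.  'letter in brokenLetters' is single-char
-- substring containment = char membership (exact).
def canBeTypedWordsInner (broken : List Char) (word : List Char) : Bool :=
  match word with
  | [] => false
  | c :: rest => if broken.contains c then true else canBeTypedWordsInner broken rest

def canBeTypedWords (text : String) (brokenLetters : String) : Int :=
  let words := PySem.Chars.splitOn text.toList [' ']   -- text.split(' '), words as char lists
  words.foldl
    (fun ans w => if canBeTypedWordsInner brokenLetters.toList w then ans - 1 else ans)
    (words.length : Int)

-- ===== PORT B =====
-- one step of the scan: commit at a space, mark bad on a broken letter
def canBeTypedWordsStep (broken : PySem.Set Char) (s : Int × Bool) (ch : Char) : Int × Bool :=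
  if ch = ' ' then ((if s.2 then s.1 else s.1 + 1), false)
  else if PySem.Set.contains broken ch then (s.1, true)
  else s

def canBeTypedWords_alt (text : String) (brokenLetters : String) : Int :=
  let broken := PySem.Set.ofList brokenLetters.toList
  let st := text.toList.foldl (canBeTypedWordsStep broken) (0, false)
  if st.2 then st.1 else st.1 + 1

-- ===== PRECONDITION & SPEC =====
def Spec_canBeTypedWords (text : String) (brokenLetters : String) (out : Int) : Prop := out = canBeTypedWords_alt text brokenLetters
instance (text : String) (brokenLetters : String) (out : Int) : Decidable (Spec_canBeTypedWords text brokenLetters out) := by unfold Spec_canBeTypedWords; infer_instance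

-- ===== CLAIM =====
def Claim_equal_canBeTypedWords : Prop := ∀ (text : String) (brokenLetters : String), Dom_canBeTypedWords text brokenLetters → Spec_canBeTypedWords text brokenLetters (canBeTypedWords text brokenLetters)

-- ===== LEMMAS AND PROOFS =====

-- structural version of split-on-a-single-space, with the pending word as accumulator
def split1 (pre : List Char) : List Char → List (List Char)
  | [] => [pre]
  | c :: rest => if c = ' ' then pre :: split1 [] rest else split1 (pre ++ [c]) rest

lemma splitOn_go_eq (fuel : Nat) :
    ∀ (l cur : List Char) (accs : List (List Char)),
      l.length ≤ fuel →
      PySem.Chars.splitOn.go [' '] fuel l cur accs = accs.reverse ++ split1 cur.reverse l := by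
  induction fuel with
  | zero =>
    intro l cur accs h
    have hl : l = [] := by cases l with
      | nil => rfl
      | cons a b => simp at h
    subst hl
    simp [PySem.Chars.splitOn.go, split1]
  | succ n ih =>
    intro l cur accs h
    cases l with
    | nil => simp [PySem.Chars.splitOn.go, split1]
    | cons c rest =>
      rw [PySem.Chars.splitOn.go]
      by_cases hc : c = ' '
      · subst hc
        have hpre : [' '].isPrefixOf (' ' :: rest) = true := by simp [List.isPrefixOf]
        rw [if_pos hpre]
        simp only [List.length_singleton, List.drop_one, List.tail_cons]
        rw [ih rest [] (cur.reverse :: accs) (by simp at h; omega)]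
        simp [split1]
      · have hpre : [' '].isPrefixOf (c :: rest) = false := by
          simp [List.isPrefixOf]; exact fun hh => hc hh.symm
        rw [if_neg (by simp [hpre])]
        rw [ih rest (c :: cur) accs (by simp at h; omega)]
        simp [split1, hc]

lemma splitOn_eq_split1 (s : List Char) :
    PySem.Chars.splitOn s [' '] = split1 [] s := by
  have := splitOn_go_eq (s.length + 1) s [] [] (by omega)
  simpa [PySem.Chars.splitOn] using this

lemma inner_eq_any (broken word : List Char) :
    canBeTypedWordsInner broken word = word.any (fun c => broken.contains c) := by
  induction word with
  | nil => rfl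
  | cons c rest ih => rw [canBeTypedWordsInner, ih]; cases h : broken.contains c <;> simp_all

-- the decrement loop computes init minus the number of fired words
lemma foldl_dec (p : List Char → Bool) (ws : List (List Char)) (init : Int) :
    ws.foldl (fun ans w => if p w then ans - 1 else ans) init
      = init - (ws.countP p : Int) := by
  induction ws generalizing init with
  | nil => simp
  | cons w rest ih => cases h : p w <;> simp [List.countP_cons, h, ih] <;> omega

lemma length_sub_countP (p : List Char → Bool) (ws : List (List Char)) :
    (ws.length : Int) - (ws.countP p : Int) = (ws.countP (fun w => ! p w) : Int) := by
  induction ws with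
  | nil => simp
  | cons w rest ih =>
    simp only [List.countP_cons, List.length_cons]
    cases h : p w <;> simp only [h, Bool.not_true, Bool.not_false] <;> push_cast <;> omega

-- the scan from state (g, "pre is bad") computes g + #good words of split1 pre l
lemma scan_eq (broken : PySem.Set Char) :
    ∀ (l : List Char) (g : Int) (pre : List Char),
      (let st := l.foldl (canBeTypedWordsStep broken) (g, pre.any (fun c => PySem.Set.contains broken c));
        if st.2 then st.1 else st.1 + 1)
      = g + ((split1 pre l).countP (fun w => ! w.any (fun c => PySem.Set.contains broken c)) : Int) := by
  intro l
  induction l with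
  | nil =>
    intro g pre
    simp only [List.foldl_nil, split1, List.countP_cons, List.countP_nil]
    cases h : pre.any (fun c => PySem.Set.contains broken c) <;> simp [h]
  | cons c rest ih =>
    intro g pre
    simp only [List.foldl_cons]
    by_cases hc : c = ' '
    · subst hc
      have hstep : canBeTypedWordsStep broken
          (g, pre.any (fun c => PySem.Set.contains broken c)) ' '
          = ((if pre.any (fun c => PySem.Set.contains broken c) then g else g + 1),
             ([] : List Char).any (fun c => PySem.Set.contains broken c)) := by
        simp [canBeTypedWordsStep]
      rw [hstep, ih]
      simp only [split1]
      rw [if_pos trivial, List.countP_cons]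
      cases h : pre.any (fun c => PySem.Set.contains broken c) <;>
        simp <;> push_cast <;> ring
    · have hstep : canBeTypedWordsStep broken
          (g, pre.any (fun c => PySem.Set.contains broken c)) c
          = (g, (pre ++ [c]).any (fun c => PySem.Set.contains broken c)) := by
        unfold canBeTypedWordsStep
        rw [if_neg hc, List.any_append]
        simp only [List.any_cons, List.any_nil, Bool.or_false]
        cases hb : PySem.Set.contains broken c <;> simp [hb]
      rw [hstep, ih]
      simp [split1, hc]

-- ===== VERDICT =====
theorem canBeTypedWords_spec : Claim_equal_canBeTypedWords := by
  intro text brokenLetters _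
  unfold Spec_canBeTypedWords canBeTypedWords canBeTypedWords_alt
  simp only
  rw [foldl_dec, splitOn_eq_split1, length_sub_countP]
  have h := scan_eq (PySem.Set.ofList brokenLetters.toList) text.toList 0 []
  simp only [List.any_nil, zero_add] at h
  rw [h]
  congr 1
  apply List.countP_congr
  intro w _
  simp [inner_eq_any]
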